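-- pv_equiv track=rewrite | github.com/woberholtzer/Cell-Segmentation | cells.py | get_cluster_centers
-- ===== SOURCE A (Python) =====
-- def get_cluster_centers(cell_labels):
--     # create empty list of lists for indices of pixels with same root
--     list_labels = [[] for _ in range((len(cell_labels))**2)]
--     for i in range(len(cell_labels)):
--         for j in range(len(cell_labels)):
--             # add each pixel's location to the index of it's root
--             list_labels[int(cell_labels[i][j])].append([i, j])
--     list_matches = []
--     for i in range(len(list_labels)):
--         # looking at only pairs...
--         if len(list_labels[i]) > 1:
--             total_x = 0
--             total_y = 0
--             counter = 0
--             for j in range(len(list_labels[i])):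
--                 # add up all first indices of a cell
--                 total_x += list_labels[i][j][0]
--                 # add up all second indices of a cell
--                 total_y += list_labels[i][j][1]
--                 # add to the counter to allow for average pixel location (center of cell)
--                 counter += 1
--             # find the average using the total of the indices and the counter
--             x = total_x//counter
--             y = total_y//counter
--             # add the center to the list
--             list_matches.append((x, y))
--     return list_matches
-- ===== SOURCE B (Python) =====
-- def get_cluster_centers(cell_labels):
--     # One table of running (sum_i, sum_j, count) accumulators per label, filled in a
--     # single pass, then one comprehension over it; no per-label coordinate lists and
--     # no second summation loop.
--     n = len(cell_labels)
--     sums = [(0, 0, 0)] * (n * n)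
--     for i, row in enumerate(cell_labels):
--         for j in range(n):
--             label = int(row[j])
--             si, sj, c = sums[label]
--             sums[label] = (si + i, sj + j, c + 1)
--     return [(si // c, sj // c) for (si, sj, c) in sums if c > 1]
-- ===== Notes on version B (the rewrite author's own statement) =====
-- stated objective: simpler
-- what changed: Replaces the table of per-label coordinate lists plus a second nested summation pass by a table of running (sum_i, sum_j, count) accumulators updated in one pass and read out by a single comprehension; Pre_ excludes only the inputs where A raises IndexError (a row shorter than the grid, or a label outside [-n*n, n*n)).
import Mathlib
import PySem

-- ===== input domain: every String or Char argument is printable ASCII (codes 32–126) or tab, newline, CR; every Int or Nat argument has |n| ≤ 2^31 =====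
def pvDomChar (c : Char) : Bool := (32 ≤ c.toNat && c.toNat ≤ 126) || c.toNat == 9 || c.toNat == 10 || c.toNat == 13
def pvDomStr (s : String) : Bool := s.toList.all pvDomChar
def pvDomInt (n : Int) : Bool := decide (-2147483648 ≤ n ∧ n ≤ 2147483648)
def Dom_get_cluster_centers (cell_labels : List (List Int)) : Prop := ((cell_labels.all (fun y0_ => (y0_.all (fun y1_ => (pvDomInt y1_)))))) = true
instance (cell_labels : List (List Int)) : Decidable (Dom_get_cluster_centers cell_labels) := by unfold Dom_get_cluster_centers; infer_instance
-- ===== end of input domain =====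

-- B replaces A's table of per-label coordinate lists plus a second nested summation pass
-- by a table of running (sum_i, sum_j, count) accumulators filled in one pass and read
-- out by a single comprehension (objective: simpler).

-- ===== PORT A =====
def get_cluster_centers (cell_labels : List (List Int)) : List (Int × Int) :=
  let n : Int := (cell_labels.length : Int)
  let list_labels0 : List (List (Int × Int)) :=
    List.replicate (cell_labels.length * cell_labels.length) []
  let filled : List (List (Int × Int)) :=
    (PySem.List.pyRange 0 n 1).foldl (fun ll i =>
      (PySem.List.pyRange 0 n 1).foldl (fun ll j =>
        let lab := PySem.List.pyGetD (PySem.List.pyGetD cell_labels i []) j 0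
        PySem.List.pySetD ll lab (PySem.List.pyGetD ll lab [] ++ [(i, j)])) ll) list_labels0
  (PySem.List.pyRange 0 (filled.length : Int) 1).foldl (fun list_matches i =>
    let bucket := PySem.List.pyGetD filled i []
    if bucket.length > 1 then
      let s := (PySem.List.pyRange 0 (bucket.length : Int) 1).foldl
        (fun (s : Int × Int × Int) j =>
          let p := PySem.List.pyGetD bucket j (0, 0)
          (s.1 + p.1, s.2.1 + p.2, s.2.2 + 1)) (0, 0, 0)
      list_matches ++ [(PySem.Int.floordiv s.1 s.2.2, PySem.Int.floordiv s.2.1 s.2.2)]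
    else list_matches) []

-- ===== PORT B =====
def get_cluster_centers_alt (cell_labels : List (List Int)) : List (Int × Int) :=
  let n : Int := (cell_labels.length : Int)
  let sums0 : List (Int × Int × Int) :=
    List.replicate (cell_labels.length * cell_labels.length) (0, 0, 0)
  let sums : List (Int × Int × Int) :=
    (PySem.List.enumerate cell_labels 0).foldl (fun tbl ir =>
      (PySem.List.pyRange 0 n 1).foldl (fun tbl j =>
        let lab := PySem.List.pyGetD ir.2 j 0
        let s := PySem.List.pyGetD tbl lab (0, 0, 0)
        PySem.List.pySetD tbl lab (s.1 + ir.1, s.2.1 + j, s.2.2 + 1)) tbl) sums0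
  sums.foldl (fun centers s =>
    if s.2.2 > 1 then
      centers ++ [(PySem.Int.floordiv s.1 s.2.2, PySem.Int.floordiv s.2.1 s.2.2)]
    else centers) []

-- ===== PRECONDITION & SPEC =====
-- Pre_ excludes exactly the inputs where A raises IndexError: a row shorter than the
-- grid height n, or a label outside [-n*n, n*n) among the first n entries of a row.
def Pre_get_cluster_centers (cell_labels : List (List Int)) : Prop :=
  ∀ row ∈ cell_labels, cell_labels.length ≤ row.length ∧
    ∀ l ∈ row.take cell_labels.length,
      -((cell_labels.length : Int) * (cell_labels.length : Int)) ≤ l ∧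
        l < (cell_labels.length : Int) * (cell_labels.length : Int)
instance (cell_labels : List (List Int)) : Decidable (Pre_get_cluster_centers cell_labels) := by
  unfold Pre_get_cluster_centers; infer_instance
def pvWitness_get_cluster_centers : List (List Int) := [[0, 0], [3, 3]]

def Spec_get_cluster_centers (cell_labels : List (List Int)) (out : List (Int × Int)) : Prop := out = get_cluster_centers_alt cell_labels
instance (cell_labels : List (List Int)) (out : List (Int × Int)) : Decidable (Spec_get_cluster_centers cell_labels out) := by unfold Spec_get_cluster_centers; infer_instance

-- ===== CLAIM (what is proved, stated in full; the proofs are below) =====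
def Claim_equal_get_cluster_centers : Prop := ∀ (cell_labels : List (List Int)), Dom_get_cluster_centers cell_labels → Pre_get_cluster_centers cell_labels → Spec_get_cluster_centers cell_labels (get_cluster_centers cell_labels)

-- ===== LEMMAS AND PROOFS =====

-- the table size
def pvM (cl : List (List Int)) : Int := (cl.length : Int) * (cl.length : Int)

-- row-major pixel list [(i, j) for i in range(n) for j in range(n)]
def pvPixels (n : Int) : List (Int × Int) :=
  (PySem.List.pyRange 0 n 1).flatMap (fun i => (PySem.List.pyRange 0 n 1).map (fun j => (i, j)))

-- the raw label read at pixel p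
def pvKey (cell_labels : List (List Int)) (p : Int × Int) : Int :=
  PySem.List.pyGetD (PySem.List.pyGetD cell_labels p.1 []) p.2 0

-- the table slot a pixel is stored under (its label as a Python list index)
def pvKeyW (cell_labels : List (List Int)) (p : Int × Int) : Int :=
  PySem.Int.mod (pvKey cell_labels p) (pvM cell_labels)

-- the pixels stored under slot l, in traversal order
def pvGrp (cell_labels : List (List Int)) (l : Int) : List (Int × Int) :=
  (pvPixels (cell_labels.length : Int)).filter (fun p => pvKeyW cell_labels p == l)

-- the (sum_i, sum_j, count) accumulator both programs run over a slot's pixels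
def pvAcc (s : Int × Int × Int) (p : Int × Int) : Int × Int × Int :=
  (s.1 + p.1, s.2.1 + p.2, s.2.2 + 1)

-- the center computed from such an accumulator
def pvCtr (s : Int × Int × Int) : Int × Int :=
  (PySem.Int.floordiv s.1 s.2.2, PySem.Int.floordiv s.2.1 s.2.2)

-- the common per-pixel table update: read slot pvKey p (Python indexing), update with g
def pvTblStep {β : Type} (cl : List (List Int)) (g : β → (Int × Int) → β) (d : β)
    (tbl : List β) (p : Int × Int) : List β :=
  PySem.List.pySetD tbl (pvKey cl p) (g (PySem.List.pyGetD tbl (pvKey cl p) d) p)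

-- A's filled table of coordinate lists
def pvFill (cl : List (List Int)) : List (List (Int × Int)) :=
  (pvPixels (cl.length : Int)).foldl (pvTblStep cl (fun b p => b ++ [p]) [])
    (List.replicate (cl.length * cl.length) [])

-- B's filled table of accumulators
def pvTbl (cl : List (List Int)) : List (Int × Int × Int) :=
  (pvPixels (cl.length : Int)).foldl (pvTblStep cl pvAcc (0, 0, 0))
    (List.replicate (cl.length * cl.length) (0, 0, 0))

-- the accumulator of slot l
def pvSum (cl : List (List Int)) (l : Int) : Int × Int × Int :=
  (pvGrp cl l).foldl pvAcc (0, 0, 0)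

-- a nested i/j loop is the loop over the row-major pixel list
theorem pv_nested_foldl {α : Type} (n : Int) (f : α → (Int × Int) → α) (init : α) :
    (PySem.List.pyRange 0 n 1).foldl (fun a i =>
      (PySem.List.pyRange 0 n 1).foldl (fun a j => f a (i, j)) a) init
    = (pvPixels n).foldl f init := by
  unfold pvPixels
  rw [List.foldl_flatMap]
  simp [List.foldl_map]

-- Python's in-range list indexing, possibly negative: the wrapped position
theorem pv_wrap_mod (m lab : Int) (h1 : -m ≤ lab) (h2 : lab < m) :
    PySem.Int.mod lab m = if 0 ≤ lab then lab else lab + m := by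
  have hpos : 0 < m := by omega
  rw [PySem.Int.mod_eq_emod_of_pos hpos]
  by_cases h0 : 0 ≤ lab
  · rw [if_pos h0]
    exact Int.emod_eq_of_lt h0 h2
  · rw [if_neg h0]
    conv_lhs => rw [show lab = (lab + m) + m * (-1) by ring]
    rw [Int.add_mul_emod_self_left]
    exact Int.emod_eq_of_lt (by omega) (by omega)

theorem pv_wrap_set {α : Type} (xs : List α) (lab : Int) (v : α)
    (h1 : -(xs.length : Int) ≤ lab) (h2 : lab < (xs.length : Int)) :
    PySem.List.pySetD xs lab v
      = xs.set (PySem.Int.mod lab (xs.length : Int)).toNat v := by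
  rw [pv_wrap_mod _ _ h1 h2]
  simp only [PySem.List.pySetD, PySem.List.pySet?, PySem.List.pyIdx?]
  by_cases h0 : 0 ≤ lab
  · rw [if_pos h0, if_pos h2, if_pos h0]
    simp
  · rw [if_neg h0, if_pos h1, if_neg h0]
    simp only [Option.map_some, Option.getD_some]
    congr 1
    omega

theorem pv_wrap_get {α : Type} (xs : List α) (lab : Int) (d : α)
    (h1 : -(xs.length : Int) ≤ lab) (h2 : lab < (xs.length : Int)) :
    PySem.List.pyGetD xs lab d
      = PySem.List.pyGetD xs ((PySem.Int.mod lab (xs.length : Int)).toNat : Int) d := by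
  rw [pv_wrap_mod _ _ h1 h2]
  by_cases h0 : 0 ≤ lab
  · rw [if_pos h0]
    rw [show ((lab.toNat : Nat) : Int) = lab by omega]
  · rw [if_neg h0]
    have hk1 : 0 < (-lab).toNat := by omega
    have hk2 : (-lab).toNat ≤ xs.length := by omega
    have hlab : lab = -(((-lab).toNat : Nat) : Int) := by omega
    rw [hlab, PySem.List.pyGetD_neg_natCast _ _ _ hk1 hk2, PySem.List.pyGetD_natCast]
    rw [List.getD_eq_getElem _ _ (by omega)]
    congr 1
    omega

theorem pv_tbl_length {β : Type} (cl : List (List Int)) (g : β → (Int × Int) → β) (d : β) :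
    ∀ (ps : List (Int × Int)) (tbl : List β),
      (ps.foldl (pvTblStep cl g d) tbl).length = tbl.length := by
  intro ps
  induction ps with
  | nil => intro tbl; rfl
  | cons p ps ih =>
      intro tbl
      simp only [List.foldl_cons, ih, pvTblStep, PySem.List.length_pySetD]

-- slot k of either filled table is its update folded over the pixels stored there
theorem pv_tbl_getD {β : Type} (cl : List (List Int)) (g : β → (Int × Int) → β) (d : β) :
    ∀ (ps : List (Int × Int)) (tbl : List β) (k : Nat),
      (tbl.length : Int) = pvM cl →
      (∀ p ∈ ps, -(pvM cl) ≤ pvKey cl p ∧ pvKey cl p < pvM cl) → k < tbl.length →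
      PySem.List.pyGetD (ps.foldl (pvTblStep cl g d) tbl) (k : Int) d
        = (ps.filter (fun p => pvKeyW cl p == (k : Int))).foldl g
            (PySem.List.pyGetD tbl (k : Int) d) := by
  intro ps
  induction ps with
  | nil => intro tbl k _ _ _; simp
  | cons p ps ih =>
      intro tbl k hm hb hk
      obtain ⟨hlo, hhi⟩ := hb p (List.mem_cons_self)
      have hW : pvKeyW cl p = PySem.Int.mod (pvKey cl p) ((tbl.length : Int)) := by
        unfold pvKeyW; rw [hm]
      have hWpos : 0 ≤ pvKeyW cl p := by
        rw [hW]; exact PySem.Int.mod_nonneg _ (by omega)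
      have hWlt : pvKeyW cl p < (tbl.length : Int) := by
        rw [hW]; exact PySem.Int.mod_lt _ (by omega)
      have hstep : pvTblStep cl g d tbl p
          = tbl.set (pvKeyW cl p).toNat
              (g (PySem.List.pyGetD tbl (((pvKeyW cl p).toNat : Int)) d) p) := by
        unfold pvTblStep
        rw [pv_wrap_set tbl _ _ (by omega) (by omega),
            pv_wrap_get tbl _ _ (by omega) (by omega), ← hW]
      have hlen : (pvTblStep cl g d tbl p).length = tbl.length := by
        rw [hstep]; simp
      have hkey : pvKeyW cl p = ((pvKeyW cl p).toNat : Int) := by omega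
      have hklt : (pvKeyW cl p).toNat < tbl.length := by omega
      rw [List.foldl_cons, ih (pvTblStep cl g d tbl p) k (by rw [hlen]; exact hm) (by
            intro q hq; exact hb q (List.mem_cons_of_mem _ hq))
          (by omega)]
      by_cases hek : (pvKeyW cl p).toNat = k
      · subst hek
        have hbeq : (pvKeyW cl p == (((pvKeyW cl p).toNat : Nat) : Int)) = true := by
          simp [← hkey]
        have hget : PySem.List.pyGetD (pvTblStep cl g d tbl p) (((pvKeyW cl p).toNat : Nat) : Int) d
            = g (PySem.List.pyGetD tbl (((pvKeyW cl p).toNat : Nat) : Int) d) p := by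
          rw [hstep, PySem.List.pyGetD_natCast,
              List.getD_eq_getElem _ _ (by simpa using hklt),
              List.getElem_set_self (by simpa using hklt)]
        rw [hget]
        simp only [List.filter_cons, hbeq, if_pos, List.foldl_cons]
      · have hbeq : (pvKeyW cl p == (k : Int)) = false := by
          simp only [beq_eq_false_iff_ne, ne_eq]
          omega
        have hget : PySem.List.pyGetD (pvTblStep cl g d tbl p) (k : Int) d
            = PySem.List.pyGetD tbl (k : Int) d := by
          rw [hstep, PySem.List.pyGetD_natCast, PySem.List.pyGetD_natCast,
              PySem.List.pyGetD_natCast,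
              List.getD_eq_getElem _ _ (by simpa using hk),
              List.getElem_set_ne (by omega), List.getD_eq_getElem _ _ hk]
        rw [hget]
        simp [hbeq]

theorem pv_acc_cnt : ∀ (l : List (Int × Int)) (s : Int × Int × Int),
    (l.foldl pvAcc s).2.2 = s.2.2 + l.length := by
  intro l
  induction l with
  | nil => intro s; simp
  | cons p l ih => intro s; rw [List.foldl_cons, ih]; simp [pvAcc]; omega

theorem pv_foldl_app {α : Type} :
    ∀ (l : List α) (init : List α), l.foldl (fun b p => b ++ [p]) init = init ++ l := by
  intro l
  induction l with
  | nil => intro init; simp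
  | cons p l ih => intro init; rw [List.foldl_cons, ih]; simp

def pvCtrOf (b : List (Int × Int)) : Int × Int :=
  pvCtr ((PySem.List.pyRange 0 (b.length : Int) 1).foldl
    (fun s j => pvAcc s (PySem.List.pyGetD b j (0, 0))) (0, 0, 0))

theorem pvCtrOf_eq (b : List (Int × Int)) : pvCtrOf b = pvCtr (b.foldl pvAcc (0, 0, 0)) := by
  unfold pvCtrOf
  rw [show (PySem.List.pyRange 0 (b.length : Int) 1).foldl
      (fun s j => pvAcc s (PySem.List.pyGetD b j (0, 0))) (0, 0, 0)
      = b.foldl pvAcc (0, 0, 0) from PySem.List.foldl_pyRange_zero_pyGetD' b (0, 0) pvAcc (0, 0, 0)]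

theorem pvA_char (cl : List (List Int)) :
    get_cluster_centers cl
      = ((pvFill cl).filter (fun b => decide (b.length > 1))).map pvCtrOf := by
  have e1 : get_cluster_centers cl
      = (PySem.List.pyRange 0
          (((PySem.List.pyRange 0 (cl.length : Int) 1).foldl
            (fun ll i => (PySem.List.pyRange 0 (cl.length : Int) 1).foldl
              (fun ll j => pvTblStep cl (fun b p => b ++ [p]) [] ll (i, j)) ll)
            (List.replicate (cl.length * cl.length) ([] : List (Int × Int)))).length : Int) 1).foldl
          (fun r i =>
            if (PySem.List.pyGetD
                ((PySem.List.pyRange 0 (cl.length : Int) 1).foldl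
                  (fun ll i => (PySem.List.pyRange 0 (cl.length : Int) 1).foldl
                    (fun ll j => pvTblStep cl (fun b p => b ++ [p]) [] ll (i, j)) ll)
                  (List.replicate (cl.length * cl.length) ([] : List (Int × Int)))) i []).length > 1
            then r ++ [pvCtrOf (PySem.List.pyGetD
                ((PySem.List.pyRange 0 (cl.length : Int) 1).foldl
                  (fun ll i => (PySem.List.pyRange 0 (cl.length : Int) 1).foldl
                    (fun ll j => pvTblStep cl (fun b p => b ++ [p]) [] ll (i, j)) ll)
                  (List.replicate (cl.length * cl.length) ([] : List (Int × Int)))) i [])]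
            else r) [] := rfl
  rw [pv_nested_foldl (cl.length : Int) (pvTblStep cl (fun b p => b ++ [p]) [])
      (List.replicate (cl.length * cl.length) ([] : List (Int × Int)))] at e1
  rw [show List.foldl (pvTblStep cl (fun b p => b ++ [p]) [])
      (List.replicate (cl.length * cl.length) ([] : List (Int × Int)))
      (pvPixels (cl.length : Int)) = pvFill cl from rfl] at e1
  rw [show (PySem.List.pyRange 0 ((pvFill cl).length : Int) 1).foldl
      (fun r i =>
        if (PySem.List.pyGetD (pvFill cl) i []).length > 1
        then r ++ [pvCtrOf (PySem.List.pyGetD (pvFill cl) i [])] else r) []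
      = (pvFill cl).foldl
          (fun r b => if b.length > 1 then r ++ [pvCtrOf b] else r) []
      from PySem.List.foldl_pyRange_zero_pyGetD' (pvFill cl) []
        (fun r b => if b.length > 1 then r ++ [pvCtrOf b] else r) []] at e1
  rw [show (pvFill cl).foldl
      (fun r b => if b.length > 1 then r ++ [pvCtrOf b] else r) []
      = [] ++ ((pvFill cl).filter (fun b => decide (b.length > 1))).map pvCtrOf
      from PySem.List.foldl_append_ite (fun b => b.length > 1) pvCtrOf (pvFill cl) []] at e1
  simpa using e1

theorem pvB_char (cl : List (List Int)) :
    get_cluster_centers_alt cl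
      = ((pvTbl cl).filter (fun s => decide (s.2.2 > 1))).map pvCtr := by
  have e2 : (PySem.List.enumerate cl 0).foldl (fun tbl ir =>
      (PySem.List.pyRange 0 (cl.length : Int) 1).foldl (fun tbl j =>
        PySem.List.pySetD tbl (PySem.List.pyGetD ir.2 j 0)
          (pvAcc (PySem.List.pyGetD tbl (PySem.List.pyGetD ir.2 j 0) (0, 0, 0)) (ir.1, j))) tbl)
      (List.replicate (cl.length * cl.length) ((0, 0, 0) : Int × Int × Int)) = pvTbl cl := by
    rw [PySem.List.enumerate_eq_map_pyRange cl ([] : List Int), List.foldl_map]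
    exact pv_nested_foldl (cl.length : Int) (pvTblStep cl pvAcc (0, 0, 0)) _
  have e1 : get_cluster_centers_alt cl
      = ((PySem.List.enumerate cl 0).foldl (fun tbl ir =>
          (PySem.List.pyRange 0 (cl.length : Int) 1).foldl (fun tbl j =>
            PySem.List.pySetD tbl (PySem.List.pyGetD ir.2 j 0)
              (pvAcc (PySem.List.pyGetD tbl (PySem.List.pyGetD ir.2 j 0) (0, 0, 0)) (ir.1, j))) tbl)
          (List.replicate (cl.length * cl.length) ((0, 0, 0) : Int × Int × Int))).foldl
          (fun r s => if s.2.2 > 1 then r ++ [pvCtr s] else r) [] := rfl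
  rw [e2] at e1
  rw [show (pvTbl cl).foldl (fun r s => if s.2.2 > 1 then r ++ [pvCtr s] else r) []
      = [] ++ ((pvTbl cl).filter (fun s => decide (s.2.2 > 1))).map pvCtr
      from PySem.List.foldl_append_ite (fun s => s.2.2 > 1) pvCtr (pvTbl cl) []] at e1
  simpa using e1

theorem pvM_cast (cl : List (List Int)) : ((cl.length * cl.length : Nat) : Int) = pvM cl := by
  unfold pvM; push_cast; ring

-- Pre_ bounds every raw label read by the loops
theorem pv_bounds (cl : List (List Int)) (hpre : Pre_get_cluster_centers cl) :
    ∀ p ∈ pvPixels (cl.length : Int),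
      -(pvM cl) ≤ pvKey cl p ∧ pvKey cl p < pvM cl := by
  intro p hp
  obtain ⟨i, hi, hp2⟩ := List.mem_flatMap.mp hp
  obtain ⟨j, hj, rfl⟩ := List.mem_map.mp hp2
  obtain ⟨hi0, hilt⟩ := (PySem.List.mem_pyRange_one).mp hi
  obtain ⟨hj0, hjlt⟩ := (PySem.List.mem_pyRange_one).mp hj
  have hilen : i.toNat < cl.length := by omega
  have hrow : PySem.List.pyGetD cl i [] = cl[i.toNat] :=
    PySem.List.pyGetD_eq_getElem _ _ hi0 (by omega)
  have hmem : cl[i.toNat] ∈ cl := List.getElem_mem hilen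
  obtain ⟨hlen, hall⟩ := hpre cl[i.toNat] hmem
  have hjlen : j.toNat < cl[i.toNat].length := by omega
  have hval : pvKey cl (i, j) = cl[i.toNat][j.toNat] := by
    unfold pvKey
    simp only []
    rw [hrow]
    exact PySem.List.pyGetD_eq_getElem _ _ hj0 (by omega)
  have hmemt : cl[i.toNat][j.toNat] ∈ cl[i.toNat].take cl.length := by
    have hjt : j.toNat < (cl[i.toNat].take cl.length).length := by
      simp [List.length_take]; omega
    have heq : (cl[i.toNat].take cl.length)[j.toNat]'hjt = cl[i.toNat][j.toNat]'hjlen :=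
      List.getElem_take
    rw [← heq]
    exact List.getElem_mem hjt
  obtain ⟨hlo, hhi⟩ := hall _ hmemt
  rw [hval]
  unfold pvM
  exact ⟨hlo, hhi⟩

-- A's filled table holds, in slot k, exactly the pixels stored under slot k
theorem pvFill_eq_map (cl : List (List Int)) (hpre : Pre_get_cluster_centers cl) :
    pvFill cl
      = (PySem.List.pyRange 0 ((cl.length * cl.length : Nat) : Int) 1).map (pvGrp cl) := by
  have hb := pv_bounds cl hpre
  apply List.ext_getElem
  · unfold pvFill
    rw [pv_tbl_length, List.length_map, PySem.List.length_pyRange_one,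
      List.length_replicate]
    omega
  · intro k hk1 hk2
    have hkm : k < cl.length * cl.length := by
      unfold pvFill at hk1
      rw [pv_tbl_length] at hk1
      simpa using hk1
    have hgd : PySem.List.pyGetD (pvFill cl) (k : Int) []
        = ((pvPixels (cl.length : Int)).filter (fun p => pvKeyW cl p == (k : Int))).foldl
            (fun b p => b ++ [p])
            (PySem.List.pyGetD (List.replicate (cl.length * cl.length) ([] : List (Int × Int))) (k : Int) []) := by
      unfold pvFill
      exact pv_tbl_getD cl _ _ _ _ k (by simp only [List.length_replicate, pvM_cast]) hb
        (by simpa using hkm)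
    have hrep : PySem.List.pyGetD
        (List.replicate (cl.length * cl.length) ([] : List (Int × Int))) (k : Int) [] = [] := by
      rw [PySem.List.pyGetD_natCast]
      simp [List.getD]
    rw [hrep, pv_foldl_app] at hgd
    have hlhs : (pvFill cl)[k] = PySem.List.pyGetD (pvFill cl) (k : Int) [] := by
      rw [PySem.List.pyGetD_natCast, List.getD_eq_getElem _ _ hk1]
    rw [hlhs, hgd]
    rw [List.getElem_map, PySem.List.getElem_pyRange_one]
    unfold pvGrp
    simp

-- B's filled table holds, in slot k, the accumulator of slot k
theorem pvTbl_eq_map (cl : List (List Int)) (hpre : Pre_get_cluster_centers cl) :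
    pvTbl cl
      = (PySem.List.pyRange 0 ((cl.length * cl.length : Nat) : Int) 1).map (fun k => pvSum cl k) := by
  have hb := pv_bounds cl hpre
  apply List.ext_getElem
  · unfold pvTbl
    rw [pv_tbl_length, List.length_map, PySem.List.length_pyRange_one,
      List.length_replicate]
    omega
  · intro k hk1 hk2
    have hkm : k < cl.length * cl.length := by
      unfold pvTbl at hk1
      rw [pv_tbl_length] at hk1
      simpa using hk1
    have hgd : PySem.List.pyGetD (pvTbl cl) (k : Int) (0, 0, 0)
        = ((pvPixels (cl.length : Int)).filter (fun p => pvKeyW cl p == (k : Int))).foldl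
            pvAcc
            (PySem.List.pyGetD (List.replicate (cl.length * cl.length) ((0, 0, 0) : Int × Int × Int)) (k : Int) (0, 0, 0)) := by
      unfold pvTbl
      exact pv_tbl_getD cl _ _ _ _ k (by simp only [List.length_replicate, pvM_cast]) hb
        (by simpa using hkm)
    have hrep : PySem.List.pyGetD
        (List.replicate (cl.length * cl.length) ((0, 0, 0) : Int × Int × Int)) (k : Int) (0, 0, 0) = (0, 0, 0) := by
      rw [PySem.List.pyGetD_natCast]
      simp [List.getD]
    rw [hrep] at hgd
    have hlhs : (pvTbl cl)[k] = PySem.List.pyGetD (pvTbl cl) (k : Int) (0, 0, 0) := by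
      rw [PySem.List.pyGetD_natCast, List.getD_eq_getElem _ _ hk1]
    rw [hlhs, hgd]
    rw [List.getElem_map, PySem.List.getElem_pyRange_one]
    unfold pvSum pvGrp
    simp

-- B's count of a slot is the slot's pixel count
theorem pv_guard (cl : List (List Int)) (l : Int) :
    decide ((pvSum cl l).2.2 > 1) = decide ((pvGrp cl l).length > 1) := by
  unfold pvSum
  rw [pv_acc_cnt]
  simp only [decide_eq_decide]
  omega

-- A in closed form
theorem pvA_final (cl : List (List Int)) (hpre : Pre_get_cluster_centers cl) :
    get_cluster_centers cl
      = ((PySem.List.pyRange 0 ((cl.length * cl.length : Nat) : Int) 1).filter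
          (fun l => decide ((pvGrp cl l).length > 1))).map (fun l => pvCtr (pvSum cl l)) := by
  rw [pvA_char, pvFill_eq_map cl hpre, List.filter_map, List.map_map]
  rw [List.filter_congr (fun x _ => rfl :
    ∀ x ∈ PySem.List.pyRange 0 ((cl.length * cl.length : Nat) : Int) 1,
      ((fun b => decide (b.length > 1)) ∘ pvGrp cl) x
        = (fun l => decide ((pvGrp cl l).length > 1)) x)]
  refine List.map_congr_left ?_
  intro l _
  simp only [Function.comp_apply, pvCtrOf_eq, pvSum]

-- ===== VERDICT (by name: the statement is the Claim_ definition above) =====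
theorem get_cluster_centers_spec : Claim_equal_get_cluster_centers := by
  intro cl _ hpre
  unfold Spec_get_cluster_centers
  rw [pvA_final cl hpre, pvB_char, pvTbl_eq_map cl hpre, List.filter_map, List.map_map]
  simp only [Function.comp_def]
  rw [List.filter_congr (fun x _ => pv_guard cl x :
    ∀ x ∈ PySem.List.pyRange 0 ((cl.length * cl.length : Nat) : Int) 1,
      (fun l => decide ((pvSum cl l).2.2 > 1)) x = (fun l => decide ((pvGrp cl l).length > 1)) x)]
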